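-- pv_equiv track=rewrite | github.com/maxieds/GATechGTDMMBSoftwareBackup | RNADB-construction/rna2ndary/SecondaryStructure.py | RemoveTightHairpinsFromConstraints
-- ===== SOURCE A (Python) =====
-- def RemoveTightHairpinsFromConstraints(constraints):
-- # Removes any base pair for which i and j are too close together
-- # The constraints list may be condensed or expanded
-- # The resulting list of constraints may contain isolated base pairs
-- # e.g. [83, 88, 2] would become [83, 88, 1]; [84, 87, 1] would be removed entirely
--      new_constraints = []
--      for i, j, k in constraints:
--           empty_space_in_hairpin = (j - k + 1) - (i + k - 1)
--           while empty_space_in_hairpin <= 3: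
--                k -= 1
--                empty_space_in_hairpin = (j - k + 1) - (i + k - 1)
--                if k > 0:
--                     new_constraints.append([i, j, k])
--      return new_constraints
-- ===== SOURCE B (Python) =====
-- def RemoveTightHairpinsFromConstraints(constraints):
--     # Survival criterion instead of simulation: a pair [i, j, t] is kept by A
--     # exactly when its loop is wide enough, 2*t >= j - i - 3 (and 1 <= t <= k-1).
--     # Build each block ascending from that closed-form lower bound, then reverse.
--     def block(i, j, k):
--         lo = max(1, -((i - j + 3) // 2))   # smallest t with 2*t >= j - i - 3, at least 1
--         return [[i, j, t] for t in range(lo, k)][::-1]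
--     out = []
--     for i, j, k in constraints:
--         out += block(i, j, k)
--     return out
-- ===== Notes on version B (the rewrite author's own statement) =====
-- stated objective: alternative
-- what changed: B replaces A's simulation of the shrinking loop by a closed-form survival criterion (a pair [i,j,t] is kept iff 2*t >= j-i-3 and 1 <= t <= k-1) and builds each block ascending from that lower bound, then reverses it; no gap is ever recomputed and no step is counted.
import Mathlib
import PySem

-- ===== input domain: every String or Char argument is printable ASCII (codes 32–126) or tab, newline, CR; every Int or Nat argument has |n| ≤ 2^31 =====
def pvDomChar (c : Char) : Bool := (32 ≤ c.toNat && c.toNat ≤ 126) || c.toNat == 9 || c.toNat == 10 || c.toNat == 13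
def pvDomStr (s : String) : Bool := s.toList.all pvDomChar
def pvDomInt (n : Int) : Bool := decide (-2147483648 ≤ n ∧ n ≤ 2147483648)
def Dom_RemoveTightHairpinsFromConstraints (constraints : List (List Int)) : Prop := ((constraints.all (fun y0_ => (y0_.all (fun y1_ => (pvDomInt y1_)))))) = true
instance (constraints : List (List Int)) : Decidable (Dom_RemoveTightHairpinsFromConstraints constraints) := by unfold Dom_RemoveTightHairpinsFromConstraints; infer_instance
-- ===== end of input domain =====

-- B replaces A's simulation of the shrinking loop by a closed-form survival
-- criterion and builds each block ascending, then reversed (objective: alternative).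

-- ===== PORT A =====
-- the inner 'while empty_space_in_hairpin <= 3' loop of A, carrying the accumulator;
-- each iteration raises empty_space by 2, so (4 - empty_space).toNat steps of fuel always suffice
def hairLoopFuel (fuel : Nat) (i j k : Int) (acc : List (List Int)) : List (List Int) :=
  match fuel with
  | 0 => acc
  | f + 1 =>
    if (j - k + 1) - (i + k - 1) ≤ 3 then
      hairLoopFuel f i j (k - 1) (if k - 1 > 0 then acc ++ [[i, j, k - 1]] else acc)
    else acc

def hairLoop (i j k : Int) (acc : List (List Int)) : List (List Int) :=
  hairLoopFuel (4 - ((j - k + 1) - (i + k - 1))).toNat i j k acc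

def RemoveTightHairpinsFromConstraints (constraints : List (List Int)) : List (List Int) :=
  constraints.foldl (fun acc row =>
    match row with
    | [i, j, k] => hairLoop i j k acc
    | _ => acc) []   -- rows of length ≠ 3 raise ValueError in Python; excluded by Pre_

-- ===== PORT B =====
def altBlock (i j k : Int) : List (List Int) :=
  let lo := max 1 (-(PySem.Int.floordiv (i - j + 3) 2))
  ((PySem.List.pyRange lo k 1).map (fun t => [i, j, t])).reverse

def altRow (row : List Int) : List (List Int) :=
  -- unpacking 'i, j, k = row' (rows of length ≠ 3 raise ValueError in Python; excluded by Pre_)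
  if row.length = 3 then altBlock row[0]! row[1]! row[2]! else []

def RemoveTightHairpinsFromConstraints_alt (constraints : List (List Int)) : List (List Int) :=
  constraints.foldl (fun out row => out ++ altRow row) []

-- ===== PRECONDITION & SPEC =====
-- Pre_: tuple unpacking 'for i, j, k in constraints' raises ValueError (in both A and B)
-- unless every row has exactly 3 entries.
def Pre_RemoveTightHairpinsFromConstraints (constraints : List (List Int)) : Prop :=
  ∀ row ∈ constraints, row.length = 3
instance (constraints : List (List Int)) : Decidable (Pre_RemoveTightHairpinsFromConstraints constraints) := by unfold Pre_RemoveTightHairpinsFromConstraints; infer_instance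

def pvWitness_RemoveTightHairpinsFromConstraints : List (List Int) := [[1, 6, 2], [0, 9, 3]]

def Spec_RemoveTightHairpinsFromConstraints (constraints : List (List Int)) (out : List (List Int)) : Prop := out = RemoveTightHairpinsFromConstraints_alt constraints
instance (constraints : List (List Int)) (out : List (List Int)) : Decidable (Spec_RemoveTightHairpinsFromConstraints constraints out) := by unfold Spec_RemoveTightHairpinsFromConstraints; infer_instance

-- ===== CLAIM =====
def Claim_equal_RemoveTightHairpinsFromConstraints : Prop := ∀ (constraints : List (List Int)), Dom_RemoveTightHairpinsFromConstraints constraints → Pre_RemoveTightHairpinsFromConstraints constraints → Spec_RemoveTightHairpinsFromConstraints constraints (RemoveTightHairpinsFromConstraints constraints)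

-- ===== LEMMAS AND PROOFS =====

-- once k ≤ 1 the while loop never appends again (every later k-1 is ≤ 0)
lemma hairLoopFuel_noapp (i j : Int) : ∀ (f : Nat) (k : Int) (acc : List (List Int)),
    k ≤ 1 → hairLoopFuel f i j k acc = acc := by
  intro f
  induction f with
  | zero => intro k acc _; rfl
  | succ f ih =>
    intro k acc hk
    rw [hairLoopFuel]
    split
    · rw [if_neg (by omega), ih (k - 1) acc (by omega)]
    · rfl

-- the while loop appends exactly B's block: the survivors t with
-- max 1 ⌈(j-i-3)/2⌉ ≤ t ≤ k-1, in descending order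
lemma hairLoopFuel_eq (i j : Int) : ∀ (f : Nat) (k : Int) (acc : List (List Int)),
    (4 - ((j - k + 1) - (i + k - 1))).toNat ≤ f →
    hairLoopFuel f i j k acc = acc ++ altBlock i j k := by
  intro f
  induction f with
  | zero =>
    intro k acc hf
    have hlo : k ≤ max 1 (-(PySem.Int.floordiv (i - j + 3) 2)) := by
      rw [PySem.Int.floordiv_eq_ediv_of_pos (by omega)]; omega
    rw [hairLoopFuel, altBlock]
    rw [PySem.List.pyRange_one_eq_nil hlo]
    simp
  | succ f ih =>
    intro k acc hf
    rw [hairLoopFuel]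
    by_cases hc : (j - k + 1) - (i + k - 1) ≤ 3
    · rw [if_pos hc]
      by_cases hk : k - 1 > 0
      · rw [if_pos hk, ih (k - 1) _ (by omega)]
        have hlo : max 1 (-(PySem.Int.floordiv (i - j + 3) 2)) ≤ k - 1 := by
          rw [PySem.Int.floordiv_eq_ediv_of_pos (by omega)]; omega
        have hsplit : PySem.List.pyRange (max 1 (-(PySem.Int.floordiv (i - j + 3) 2))) k 1
            = PySem.List.pyRange (max 1 (-(PySem.Int.floordiv (i - j + 3) 2))) (k - 1) 1 ++ [k - 1] := by
          have := PySem.List.pyRange_one_succ_right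
            (a := max 1 (-(PySem.Int.floordiv (i - j + 3) 2))) (b := k - 1) hlo
          simpa using this
        simp only [altBlock, hsplit, List.map_append, List.reverse_append]
        simp
      · rw [if_neg hk, hairLoopFuel_noapp i j f (k - 1) acc (by omega)]
        have hlo : k ≤ max 1 (-(PySem.Int.floordiv (i - j + 3) 2)) := by omega
        rw [altBlock]
        rw [PySem.List.pyRange_one_eq_nil hlo]
        simp
    · rw [if_neg hc]
      have hlo : k ≤ max 1 (-(PySem.Int.floordiv (i - j + 3) 2)) := by
        rw [PySem.Int.floordiv_eq_ediv_of_pos (by omega)]; omega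
      rw [altBlock]
      rw [PySem.List.pyRange_one_eq_nil hlo]
      simp

lemma step_eq (acc : List (List Int)) (i j k : Int) :
    hairLoop i j k acc = acc ++ altBlock i j k :=
  hairLoopFuel_eq i j _ k acc le_rfl

-- ===== VERDICT =====
theorem RemoveTightHairpinsFromConstraints_spec : Claim_equal_RemoveTightHairpinsFromConstraints := by
  intro constraints _ hpre
  unfold Spec_RemoveTightHairpinsFromConstraints RemoveTightHairpinsFromConstraints RemoveTightHairpinsFromConstraints_alt
  suffices h : ∀ (l acc : List (List Int)), (∀ row ∈ l, row.length = 3) →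
      l.foldl (fun acc row => match row with | [i, j, k] => hairLoop i j k acc | _ => acc) acc
        = l.foldl (fun out row => out ++ altRow row) acc by
    exact h constraints [] hpre
  intro l
  induction l with
  | nil => intro acc _; rfl
  | cons row rest ih =>
    intro acc hlen
    have h3 := hlen row (by simp)
    rcases row with _ | ⟨i, _ | ⟨j, _ | ⟨k, _ | ⟨x, t⟩⟩⟩⟩ <;> simp at h3
    simp only [List.foldl_cons]
    rw [step_eq, ih _ (fun r hr => hlen r (by simp [hr]))]
    simp [altRow]
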